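-- pv_equiv track=rewrite | github.com/opensanctions/opensanctions | datasets/se/soe/extract_csv_from_report_pdf_2024.py | clean_names
-- ===== SOURCE A (Python) =====
-- def clean_names(section_text: str) -> list[str]:
--     """Extract individual names from a section of text."""
--     # Replace common separators with commas
--     text = section_text
--     text = text.replace(" och ", ",")
--     text = text.replace("\n", ",")
--     text = text.replace(".", ",")
--     # Remove parenthetical content (e.g., company names in parentheses)
--     while "(" in text and ")" in text:
--         start = text.find("(")
--         end = text.find(")", start)
--         if end > start:
--             text = text[:start] + text[end + 1 :]
--         else:
--             break
--     # Split on commas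
--     parts = text.split(",")
--     names = []
--     for part in parts:
--         part = part.strip()
--         # Skip if empty, too short, contains numbers, or contains %
--         if not part or len(part) < 3:
--             continue
--         if any(c.isdigit() for c in part):
--             continue
--         if "%" in part:
--             continue
--         # Should have at least one space (first name + last name)
--         if " " in part:
--             names.append(part)
--     return names
-- ===== SOURCE B (Python) =====
-- def clean_names(section_text: str) -> list[str]:
--     """Extract individual names from a section of text."""
--     text = section_text.replace(" och ", ",").replace("\n", ",").replace(".", ",")
--     # Strip parenthetical spans in one left-to-right pass (non-nested, global);
--     # an '(' with no ')' after it keeps the rest of the string unchanged.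
--     kept = []
--     i = 0
--     while i < len(text):
--         if text[i] == "(":
--             j = text.find(")", i)
--             if j == -1:
--                 kept.append(text[i:])
--                 break
--             i = j + 1
--         else:
--             kept.append(text[i])
--             i += 1
--     cleaned = "".join(kept)
--     parts = [p.strip() for p in cleaned.split(",")]
--     return [p for p in parts
--             if len(p) >= 3 and " " in p and "%" not in p
--             and not any(c.isdigit() for c in p)]
-- ===== Notes on version B (the rewrite author's own statement) =====
-- stated objective: simpler
-- what changed: Replaces A's while-loop that re-searches the whole string and re-splices it for every parenthesis pair with a single left-to-right pass that drops each (...) span once, and replaces the continue-chain filter loop with a strip-map plus one filter comprehension.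
import Mathlib
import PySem

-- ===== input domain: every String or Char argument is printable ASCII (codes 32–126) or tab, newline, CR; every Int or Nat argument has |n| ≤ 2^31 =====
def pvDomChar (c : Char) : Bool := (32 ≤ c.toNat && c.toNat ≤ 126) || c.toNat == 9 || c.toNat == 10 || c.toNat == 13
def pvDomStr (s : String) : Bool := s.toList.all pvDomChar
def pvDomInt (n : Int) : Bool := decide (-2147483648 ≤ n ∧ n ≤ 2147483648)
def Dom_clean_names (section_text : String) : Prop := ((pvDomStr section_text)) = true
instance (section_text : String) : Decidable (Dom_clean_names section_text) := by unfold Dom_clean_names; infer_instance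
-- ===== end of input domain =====

-- B replaces A's repeated find-and-splice while-loop over the whole string by a single
-- left-to-right pass removing each "(...)" span, and the continue-chain filter loop by a
-- map-strip + filter comprehension (objective: simpler; same observable behaviour).

-- ===== PORT A =====
-- termination fact for A's while-loop (each splice removes the span "(...)", ≥ 2 chars)
lemma stripLoopA_dec (t : List Char) (h1 : PySem.Chars.isIn ['('] t = true)
    (h2 : PySem.Chars.find t ['('] < PySem.Chars.findFrom t [')'] (PySem.Chars.find t ['('])) :
    (PySem.List.slice t none (some (PySem.Chars.find t ['('])) ++
      PySem.List.slice t (some (PySem.Chars.findFrom t [')'] (PySem.Chars.find t ['(']) + 1)) none).length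
      < t.length := by
  have hinf : ['('] <:+: t := (PySem.Chars.isIn_iff_infix _ _).mp h1
  have h0 : 0 ≤ PySem.Chars.find t ['('] := (PySem.Chars.find_nonneg_iff _ _).mpr hinf
  obtain ⟨hpre, -⟩ := PySem.Chars.find_spec h0
  have hlt : (PySem.Chars.find t ['(']).toNat < t.length := by
    obtain ⟨tl, htl⟩ := hpre
    have hne : t.drop (PySem.Chars.find t ['(']).toNat ≠ [] := by
      intro hnil; rw [hnil] at htl; exact absurd htl (by simp)
    have := List.length_drop (l := t) (i := (PySem.Chars.find t ['(']).toNat)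
    rcases Nat.lt_or_ge (PySem.Chars.find t ['(']).toNat t.length with h | h
    · exact h
    · exact absurd (List.drop_eq_nil_of_le h) hne
  rw [PySem.List.slice_to _ h0, PySem.List.slice_from _ (by omega)]
  simp only [List.length_append, List.length_take, List.length_drop]
  have he1 : (PySem.Chars.findFrom t [')'] (PySem.Chars.find t ['(']) + 1).toNat
      ≥ (PySem.Chars.find t ['(']).toNat + 2 := by omega
  omega

-- A's while-loop: repeatedly find the first '(' and the first ')' after it, splice the span out
def stripLoopA (t : List Char) : List Char :=
  if h1 : PySem.Chars.isIn ['('] t && PySem.Chars.isIn [')'] t then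
    if h2 : PySem.Chars.find t ['('] < PySem.Chars.findFrom t [')'] (PySem.Chars.find t ['(']) then
      stripLoopA (PySem.List.slice t none (some (PySem.Chars.find t ['('])) ++
                  PySem.List.slice t (some (PySem.Chars.findFrom t [')'] (PySem.Chars.find t ['(']) + 1)) none)
    else t
  else t
termination_by t.length
decreasing_by
  exact stripLoopA_dec t (by simpa using (Bool.and_eq_true _ _ |>.mp h1).1) h2

def clean_names (section_text : String) : List String :=
  let t1 := PySem.Chars.replace section_text.toList " och ".toList [',']
  let t2 := PySem.Chars.replace t1 ['\n'] [',']
  let t3 := PySem.Chars.replace t2 ['.'] [',']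
  let text := stripLoopA t3
  let parts := PySem.Chars.splitOn text [',']
  let names := parts.foldl (fun names part =>
    let part := PySem.Chars.strip part
    if part = [] ∨ part.length < 3 then names
    else if part.any PySem.Chars.isdigit then names
    else if PySem.Chars.isIn ['%'] part then names
    else if PySem.Chars.isIn [' '] part then names ++ [part]
    else names) ([] : List (List Char))
  names.map String.ofList

-- ===== PORT B =====
-- B's single pass: copy chars; at '(' jump past the next ')' (keep the rest if none)
def stripPassB (t : List Char) : List Char :=
  match t with
  | [] => []
  | c :: rest =>
    if c = '(' then
      if PySem.Chars.find rest [')'] = -1 then c :: rest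
      else stripPassB (rest.drop ((PySem.Chars.find rest [')']).toNat + 1))
    else c :: stripPassB rest
termination_by t.length
decreasing_by
  · simp only [List.length_cons, List.length_drop]; omega
  · simp

-- B's keep-condition for a stripped part
def keepB (p : List Char) : Bool :=
  decide (3 ≤ p.length) && PySem.Chars.isIn [' '] p && !PySem.Chars.isIn ['%'] p
    && !p.any PySem.Chars.isdigit

def clean_names_alt (section_text : String) : List String :=
  let text := PySem.Chars.replace (PySem.Chars.replace
    (PySem.Chars.replace section_text.toList " och ".toList [',']) ['\n'] [',']) ['.'] [',']
  let cleaned := stripPassB text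
  let parts := (PySem.Chars.splitOn cleaned [',']).map PySem.Chars.strip
  (parts.filter keepB).map String.ofList

-- ===== PRECONDITION & SPEC =====
def Spec_clean_names (section_text : String) (out : List String) : Prop := out = clean_names_alt section_text
instance (section_text : String) (out : List String) : Decidable (Spec_clean_names section_text out) := by unfold Spec_clean_names; infer_instance

-- ===== CLAIM (what is proved, stated in full; the proofs are below) =====
def Claim_equal_clean_names : Prop := ∀ (section_text : String), Dom_clean_names section_text → Spec_clean_names section_text (clean_names section_text)

-- ===== LEMMAS AND PROOFS =====

-- in a ++ c :: r with c ∉ a, Python find locates c at index a.length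
lemma find_singleton (c : Char) (a r : List Char) (hc : c ∉ a) :
    PySem.Chars.find (a ++ c :: r) [c] = (a.length : Int) := by
  have hinf : [c] <:+: a ++ c :: r := (List.singleton_infix_iff _ _).mpr (by simp)
  have h0 : 0 ≤ PySem.Chars.find (a ++ c :: r) [c] :=
    (PySem.Chars.find_nonneg_iff _ _).mpr hinf
  obtain ⟨hpre, hmin⟩ := PySem.Chars.find_spec h0
  have hne : (PySem.Chars.find (a ++ c :: r) [c]).toNat = a.length := by
    rcases lt_trichotomy (PySem.Chars.find (a ++ c :: r) [c]).toNat a.length with h | h | h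
    · exfalso
      obtain ⟨tl, htl⟩ := hpre
      have hh : (List.drop (PySem.Chars.find (a ++ c :: r) [c]).toNat (a ++ c :: r)).head? = some c := by
        rw [← htl]; rfl
      rw [List.head?_drop] at hh
      rw [List.getElem?_append_left h] at hh
      exact hc (List.mem_of_getElem? hh)
    · exact h
    · exact absurd (by rw [List.drop_left]; exact ⟨r, rfl⟩ : [c] <+: List.drop a.length (a ++ c :: r)) (hmin a.length h)
  omega

lemma find_singleton_none (c : Char) (t : List Char) (hc : c ∉ t) :
    PySem.Chars.find t [c] = -1 :=
  (PySem.Chars.find_eq_neg_one_iff _ _).mpr (fun h => hc ((List.singleton_infix_iff _ _).mp h))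

lemma isIn_singleton (c : Char) (t : List Char) :
    PySem.Chars.isIn [c] t = true ↔ c ∈ t := by
  rw [PySem.Chars.isIn_iff_infix, List.singleton_infix_iff]

-- B's pass copies a '('-free prefix unchanged
lemma stripPassB_append (a : List Char) (s : List Char) (ha : '(' ∉ a) :
    stripPassB (a ++ s) = a ++ stripPassB s := by
  induction a with
  | nil => simp
  | cons x xs ih =>
    have hx : ¬ x = '(' := fun h => ha (h ▸ List.mem_cons_self ..)
    rw [List.cons_append, stripPassB]
    simp only [hx, if_false]
    rw [ih (fun h => ha (List.mem_cons_of_mem _ h))]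
    simp

-- every char of t is in t; first-occurrence decomposition
lemma first_occ {c : Char} {t : List Char} (h : c ∈ t) :
    ∃ a r, t = a ++ c :: r ∧ c ∉ a := by
  induction t with
  | nil => cases h
  | cons x xs ih =>
    by_cases hx : x = c
    · exact ⟨[], xs, by simp [hx], by simp⟩
    · rcases List.mem_cons.mp h with h | h
      · exact absurd h.symm hx
      · obtain ⟨a, r, h1, h2⟩ := ih h
        exact ⟨x :: a, r, by simp [h1], by
          simp only [List.mem_cons, not_or]
          exact ⟨fun hcx => hx hcx.symm, h2⟩⟩

-- main lemma: A's while-loop equals B's single pass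
lemma strip_eq (n : Nat) : ∀ t : List Char, t.length ≤ n → stripLoopA t = stripPassB t := by
  induction n with
  | zero =>
    intro t ht
    have : t = [] := List.eq_nil_of_length_eq_zero (by omega)
    subst this
    have hc : PySem.Chars.isIn ['('] [] = false := by decide
    rw [stripLoopA, stripPassB]
    simp [hc]
  | succ n ih =>
    intro t ht
    by_cases hmem : '(' ∈ t
    · obtain ⟨a, r, rfl, ha⟩ := first_occ hmem
      have hfind : PySem.Chars.find (a ++ '(' :: r) ['('] = (a.length : Int) :=
        find_singleton _ _ _ ha
      by_cases hr : ')' ∈ r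
      · -- a valid span: A splices it out and loops; B skips it and continues
        obtain ⟨q, s, rfl, hq⟩ := first_occ hr
        have hq' : ')' ∉ '(' :: q := by
          simp only [List.mem_cons, not_or]; exact ⟨by decide, hq⟩
        have hdropA : List.drop a.length (a ++ '(' :: (q ++ ')' :: s)) = '(' :: (q ++ ')' :: s) :=
          List.drop_left
        have hfindFrom : PySem.Chars.findFrom (a ++ '(' :: (q ++ ')' :: s)) [')'] (a.length : Int)
            = (a.length : Int) + (q.length + 1 : Nat) := by
          rw [PySem.Chars.findFrom_natCast _ _ a.length (by simp)]
          rw [hdropA]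
          have : PySem.Chars.find ('(' :: (q ++ ')' :: s)) [')'] = ((('(' :: q).length : Nat) : Int) := by
            have := find_singleton ')' ('(' :: q) s hq'
            simpa using this
          simp only [List.length_cons] at this
          rw [this]
          simp; omega
        rw [stripLoopA]
        have hc1 : PySem.Chars.isIn ['('] (a ++ '(' :: (q ++ ')' :: s)) = true :=
          (isIn_singleton _ _).mpr (by simp)
        have hc2 : PySem.Chars.isIn [')'] (a ++ '(' :: (q ++ ')' :: s)) = true :=
          (isIn_singleton _ _).mpr (by simp)
        have hlt : PySem.Chars.find (a ++ '(' :: (q ++ ')' :: s)) ['(']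
            < PySem.Chars.findFrom (a ++ '(' :: (q ++ ')' :: s)) [')']
                (PySem.Chars.find (a ++ '(' :: (q ++ ')' :: s)) ['(']) := by
          rw [hfind, hfindFrom]; omega
        simp only [hc1, hc2, Bool.and_self, hlt, dite_eq_ite, if_pos]
        rw [hfind, hfindFrom]
        have hslice1 : PySem.List.slice (a ++ '(' :: (q ++ ')' :: s)) none (some (a.length : Int)) = a := by
          rw [PySem.List.slice_to _ (by positivity)]
          simp
        have hslice2 : PySem.List.slice (a ++ '(' :: (q ++ ')' :: s))
            (some ((a.length : Int) + (q.length + 1 : Nat) + 1)) none = s := by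
          rw [PySem.List.slice_from _ (by positivity)]
          have harr : (a ++ '(' :: (q ++ ')' :: s)) = (a ++ '(' :: q ++ [')']) ++ s := by simp
          have hlen : ((a.length : Int) + (q.length + 1 : Nat) + 1).toNat
              = (a ++ '(' :: q ++ [')']).length := by simp; omega
          rw [harr, hlen, List.drop_left]
        rw [hslice1, hslice2]
        have hlenas : (a ++ s).length ≤ n := by
          have := ht; simp only [List.length_append, List.length_cons] at this ⊢; omega
        rw [ih (a ++ s) hlenas, stripPassB_append a s ha, stripPassB_append a _ ha]
        congr 1
        rw [stripPassB]
        have hfq : PySem.Chars.find (q ++ ')' :: s) [')'] = (q.length : Int) :=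
          find_singleton _ _ _ hq
        simp only [hfq]
        have hne : ¬ ((q.length : Int) = -1) := by omega
        simp only [hne, if_false]
        have : ((q.length : Int)).toNat + 1 = (q ++ [')']).length := by simp
        rw [this]
        have : q ++ ')' :: s = (q ++ [')']) ++ s := by simp
        rw [this, List.drop_left]
        simp
      · -- '(' with no ')' after it: both sides leave the string unchanged
        have hBside : stripPassB (a ++ '(' :: r) = a ++ '(' :: r := by
          rw [stripPassB_append a _ ha, stripPassB]
          simp [find_singleton_none ')' r hr]
        rw [hBside, stripLoopA]
        by_cases hc2 : ')' ∈ a ++ '(' :: r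
        · have hc2' : PySem.Chars.isIn [')'] (a ++ '(' :: r) = true := (isIn_singleton _ _).mpr hc2
          have hc1 : PySem.Chars.isIn ['('] (a ++ '(' :: r) = true :=
            (isIn_singleton _ _).mpr (by simp)
          have hff : PySem.Chars.findFrom (a ++ '(' :: r) [')'] (a.length : Int) = -1 := by
            rw [PySem.Chars.findFrom_natCast _ _ a.length (by simp)]
            rw [List.drop_left]
            have : PySem.Chars.find ('(' :: r) [')'] = -1 :=
              find_singleton_none ')' _ (by
                simp only [List.mem_cons, not_or]; exact ⟨by decide, hr⟩)
            simp [this]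
          have hnlt : ¬ PySem.Chars.find (a ++ '(' :: r) ['(']
              < PySem.Chars.findFrom (a ++ '(' :: r) [')']
                  (PySem.Chars.find (a ++ '(' :: r) ['(']) := by
            rw [hfind, hff]; omega
          simp [hc1, hc2', hnlt]
        · have hc2' : PySem.Chars.isIn [')'] (a ++ '(' :: r) = false := by
            rw [← Bool.not_eq_true]; rw [isIn_singleton]; exact hc2
          simp [hc2']
    · -- no '(' at all: both sides are the identity
      have hB : stripPassB t = t := by
        have hnil : stripPassB [] = [] := by rw [stripPassB]
        have := stripPassB_append t [] hmem
        rw [hnil] at this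
        simpa using this
      rw [hB, stripLoopA]
      have hc1 : PySem.Chars.isIn ['('] t = false := by
        rw [← Bool.not_eq_true, isIn_singleton]; exact hmem
      simp [hc1]

-- A's filter loop equals map-strip + filter keepB
lemma fold_eq (ps : List (List Char)) (acc : List (List Char)) :
    ps.foldl (fun names part =>
      let part := PySem.Chars.strip part
      if part = [] ∨ part.length < 3 then names
      else if part.any PySem.Chars.isdigit then names
      else if PySem.Chars.isIn ['%'] part then names
      else if PySem.Chars.isIn [' '] part then names ++ [part]
      else names) acc
    = acc ++ ((ps.map PySem.Chars.strip).filter keepB) := by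
  induction ps generalizing acc with
  | nil => simp
  | cons p ps ih =>
    simp only [List.foldl_cons, List.map_cons, List.filter_cons]
    rw [ih]
    have hstep : (let part := PySem.Chars.strip p;
        if part = [] ∨ part.length < 3 then acc
        else if part.any PySem.Chars.isdigit then acc
        else if PySem.Chars.isIn ['%'] part then acc
        else if PySem.Chars.isIn [' '] part then acc ++ [part]
        else acc)
        = if keepB (PySem.Chars.strip p) then acc ++ [PySem.Chars.strip p] else acc := by
      simp only [keepB]
      by_cases h1 : PySem.Chars.strip p = [] ∨ (PySem.Chars.strip p).length < 3
      · have : ¬ 3 ≤ (PySem.Chars.strip p).length := by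
          rcases h1 with h | h
          · simp [h]
          · omega
        simp [h1, this]
      · have h3 : 3 ≤ (PySem.Chars.strip p).length := by
          by_contra hx
          exact h1 (Or.inr (by omega))
        simp only [h1, if_false, h3, decide_true, Bool.true_and]
        by_cases h2 : (PySem.Chars.strip p).any PySem.Chars.isdigit
        · simp [h2]
        · simp only [h2, Bool.not_false]
          by_cases h4 : PySem.Chars.isIn ['%'] (PySem.Chars.strip p)
          · simp [h4]
          · simp only [Bool.not_eq_true] at h2 h4
            by_cases h5 : PySem.Chars.isIn [' '] (PySem.Chars.strip p)
            · simp [h4, h5]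
            · simp only [Bool.not_eq_true] at h5
              simp [h4, h5]
    rw [hstep]
    by_cases hk : keepB (PySem.Chars.strip p)
    · simp [hk]
    · simp [hk]

-- ===== VERDICT (by name: the statement is the Claim_ definition above) =====
theorem clean_names_spec : Claim_equal_clean_names := by
  intro s _
  unfold Spec_clean_names
  simp only [clean_names, clean_names_alt]
  rw [strip_eq _ _ (le_refl _), fold_eq]
  simp
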